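-- pv_equiv track=rewrite | github.com/87tickly/turni-pdm | scripts/enrich_db_asti_from_arturo.py | segments_from_fermate
-- ===== SOURCE A (Python) =====
-- def segments_from_fermate(fermate: list[dict]) -> list[dict]:
--     """Genera segmenti consecutivi tra KEY_STATIONS della stessa tratta."""
--     segs = []
--     for i in range(len(fermate)):
--         for j in range(i + 1, len(fermate)):
--             a = fermate[i]
--             b = fermate[j]
--             if not a.get("dep") or not b.get("arr"):
--                 continue
--             segs.append({
--                 "from_station": a["station"],
--                 "to_station": b["station"],
--                 "dep_time": a["dep"],
--                 "arr_time": b["arr"],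
--             })
--     return segs
-- ===== SOURCE B (Python) =====
-- def segments_from_fermate(fermate: list[dict]) -> list[dict]:
--     """Single backward pass: maintain the list of arrival stops seen so far
--     (i.e. those to the right), and for each departing stop prepend its block
--     of segments, building the output back-to-front."""
--     segs = []
--     arrs = []  # stops with truthy 'arr' lying to the right, in original order
--     for a in reversed(fermate):
--         if a.get("dep"):
--             segs = [{
--                 "from_station": a["station"],
--                 "to_station": b["station"],
--                 "dep_time": a["dep"],
--                 "arr_time": b["arr"],
--             } for b in arrs] + segs
--         if a.get("arr"):
--             arrs.insert(0, a)
--     return segs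
-- ===== Notes on version B (the rewrite author's own statement) =====
-- stated objective: alternative
-- what changed: Replaces the nested index loops over all later positions with a single backward pass that maintains the suffix list of arrival stops and prepends each departure's segment block, building the output back-to-front.
import Mathlib
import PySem

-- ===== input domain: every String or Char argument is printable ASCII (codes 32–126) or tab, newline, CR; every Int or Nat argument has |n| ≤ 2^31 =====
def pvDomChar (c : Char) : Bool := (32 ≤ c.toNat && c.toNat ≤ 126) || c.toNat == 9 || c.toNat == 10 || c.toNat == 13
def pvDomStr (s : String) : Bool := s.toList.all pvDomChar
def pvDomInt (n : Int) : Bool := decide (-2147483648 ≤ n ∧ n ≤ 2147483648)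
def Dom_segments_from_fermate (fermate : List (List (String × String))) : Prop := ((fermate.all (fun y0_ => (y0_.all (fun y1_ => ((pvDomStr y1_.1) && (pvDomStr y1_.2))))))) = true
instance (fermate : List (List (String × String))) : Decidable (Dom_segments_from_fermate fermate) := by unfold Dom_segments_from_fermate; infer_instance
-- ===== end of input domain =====

-- B replaces A's nested index scans by one backward pass keeping the suffix
-- list of arrival stops and building the output back-to-front (alternative
-- decomposition, same return value). Dicts are association lists; lookup is
-- first match per the type convention.

-- d.get(k) with default "" (Python: None and "" are both falsy, so one default covers both)
def pvGetD (d : List (String × String)) (k : String) : String :=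
  (PySem.Dict.getD (PySem.Dict.mk d) k "")

-- the segment dict A/B append (a["station"] etc.: key present under Pre_, default unreachable there)
def pvMkSeg (a b : List (String × String)) : List (String × String) :=
  [("from_station", pvGetD a "station"), ("to_station", pvGetD b "station"),
   ("dep_time", pvGetD a "dep"), ("arr_time", pvGetD b "arr")]

-- ===== PORT A =====
-- inner loop: for j in range(i+1, len): scan the elements after position i
def segA_inner (a : List (String × String)) (segs : List (List (String × String)))
    (rest : List (List (String × String))) : List (List (String × String)) :=
  rest.foldl (fun segs b =>
    if pvGetD a "dep" = "" ∨ pvGetD b "arr" = "" then segs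
    else segs ++ [pvMkSeg a b]) segs

-- outer loop: for i in range(len), carrying the accumulated segs
def segA_go (segs : List (List (String × String))) :
    List (List (String × String)) → List (List (String × String))
  | [] => segs
  | a :: rest => segA_go (segA_inner a segs rest) rest

def segments_from_fermate (fermate : List (List (String × String))) : List (List (String × String)) :=
  segA_go [] fermate

-- ===== PORT B =====
-- one step of B's loop over reversed(fermate): state = (segs, arrs)
def segB_step (st : List (List (String × String)) × List (List (String × String)))
    (a : List (String × String)) :
    List (List (String × String)) × List (List (String × String)) :=
  (if pvGetD a "dep" ≠ "" then st.2.map (fun b => pvMkSeg a b) ++ st.1 else st.1,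
   if pvGetD a "arr" ≠ "" then a :: st.2 else st.2)

def segments_from_fermate_alt (fermate : List (List (String × String))) : List (List (String × String)) :=
  (fermate.reverse.foldl segB_step ([], [])).1

-- ===== PRECONDITION & SPEC =====
-- Pre_ excludes exactly the inputs on which A raises KeyError: some pair i < j with
-- fermate[i]['dep'] and fermate[j]['arr'] both truthy while one of the two lacks 'station'.
def Pre_segments_from_fermate (fermate : List (List (String × String))) : Prop :=
  List.Pairwise (fun a b => (pvGetD a "dep" ≠ "" ∧ pvGetD b "arr" ≠ "") →
    ((PySem.Dict.get? (PySem.Dict.mk a) "station").isSome ∧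
     (PySem.Dict.get? (PySem.Dict.mk b) "station").isSome)) fermate
instance (fermate : List (List (String × String))) : Decidable (Pre_segments_from_fermate fermate) := by
  unfold Pre_segments_from_fermate; infer_instance

def pvWitness_segments_from_fermate : (List (List (String × String))) :=
  [[("station", "Asti"), ("dep", "08:00")], [("station", "Alba"), ("arr", "08:30")]]

def Spec_segments_from_fermate (fermate : List (List (String × String))) (out : List (List (String × String))) : Prop := out = segments_from_fermate_alt fermate
instance (fermate : List (List (String × String))) (out : List (List (String × String))) : Decidable (Spec_segments_from_fermate fermate out) := by unfold Spec_segments_from_fermate; infer_instance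

-- ===== CLAIM (what is proved, stated in full; the proofs are below) =====
def Claim_equal_segments_from_fermate : Prop := ∀ (fermate : List (List (String × String))), Dom_segments_from_fermate fermate → Pre_segments_from_fermate fermate → Spec_segments_from_fermate fermate (segments_from_fermate fermate)

-- ===== LEMMAS AND PROOFS =====

-- A's inner loop, closed form: the accumulator plus the block for departure a
theorem segA_inner_eq (a : List (String × String)) (segs : List (List (String × String)))
    (rest : List (List (String × String))) :
    segA_inner a segs rest =
      segs ++ (if pvGetD a "dep" ≠ "" then
        (rest.filter (fun b => pvGetD b "arr" ≠ "")).map (fun b => pvMkSeg a b) else []) := by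
  induction rest generalizing segs with
  | nil => simp [segA_inner]
  | cons b rest ih =>
    simp only [segA_inner, List.foldl_cons] at *
    rw [ih]
    by_cases hd : pvGetD a "dep" = "" <;> by_cases ha : pvGetD b "arr" = "" <;>
      simp [hd, ha]

-- B's state after processing a suffix: second component = arrival stops of that suffix
theorem segB_snd (l : List (List (String × String))) :
    (l.foldr (fun a st => segB_step st a) ([], [])).2 =
      l.filter (fun b => pvGetD b "arr" ≠ "") := by
  induction l with
  | nil => rfl
  | cons a l ih =>
    rcases hst : l.foldr (fun a st => segB_step st a) ([], []) with ⟨s1, s2⟩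
    rw [hst] at ih
    rw [List.foldr_cons, hst, List.filter_cons]
    by_cases h : pvGetD a "arr" = "" <;> simp [segB_step, h] <;> simpa using ih

-- main invariant: A's accumulating outer loop vs B's foldr
theorem segA_go_eq (l : List (List (String × String))) (segs : List (List (String × String))) :
    segA_go segs l = segs ++ (l.foldr (fun a st => segB_step st a) ([], [])).1 := by
  induction l generalizing segs with
  | nil => simp [segA_go]
  | cons a rest ih =>
    simp only [segA_go]
    rw [ih, segA_inner_eq, List.foldr_cons]
    rcases hst : rest.foldr (fun a st => segB_step st a) ([], []) with ⟨s1, s2⟩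
    have h2 : s2 = rest.filter (fun b => pvGetD b "arr" ≠ "") := by
      have := segB_snd rest; rw [hst] at this; simpa using this
    by_cases hd : pvGetD a "dep" = "" <;> simp [segB_step, hd, h2, List.append_assoc]

-- ===== VERDICT (by name: the statement is the Claim_ definition above) =====
theorem segments_from_fermate_spec : Claim_equal_segments_from_fermate := by
  intro fermate _ _
  show segments_from_fermate fermate = segments_from_fermate_alt fermate
  rw [segments_from_fermate, segments_from_fermate_alt, List.foldl_reverse, segA_go_eq]
  simp
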